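-- pv_equiv track=rewrite | github.com/SSCE-UB/bcpc-league-problems | 2025-12-18_week03/D/solutions/solution.py | solve_one
-- ===== SOURCE A (Python) =====
-- def cat(c: str) -> int:
--     o = ord(c)
--     if 65 <= o <= 90:   # A-Z
--         return 0
--     if 97 <= o <= 122:  # a-z
--         return 1
--     return 2            # 0-9
--
-- def solve_one(s: str) -> int:
--     n = len(s)
--     cnt = [0, 0, 0]
--     have = 0
--     ans = 10**9
--     l = 0
--
--     for r, ch in enumerate(s):
--         t = cat(ch)
--         if cnt[t] == 0:
--             have += 1
--         cnt[t] += 1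
--
--         while have == 3 and (r - l + 1) >= 6:
--             ans = min(ans, r - l + 1)
--             tl = cat(s[l])
--             cnt[tl] -= 1
--             if cnt[tl] == 0:
--                 have -= 1
--             l += 1
--
--     return 0 if ans == 10**9 else ans
-- ===== SOURCE B (Python) =====
-- def solve_one(s: str) -> int:
--     # One forward pass over last-seen indices per category: the shortest all-three
--     # window ending at r is r - min(last) + 1; clamp it up to the minimum length 6.
--     # No counts, no left pointer, no inner shrink loop.
--     INF = 10 ** 9
--     lu = ll = ld = -1          # last index of an upper, lower, other char
--     best = INF
--     for r, ch in enumerate(s):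
--         if 'A' <= ch <= 'Z':
--             lu = r
--         elif 'a' <= ch <= 'z':
--             ll = r
--         else:
--             ld = r
--         if lu >= 0 and ll >= 0 and ld >= 0:
--             L = r - min(lu, ll, ld) + 1
--             if L >= 6:
--                 best = min(best, L)
--             elif r >= 5:
--                 best = min(best, 6)
--     return 0 if best == INF else best
-- ===== Notes on version B (the rewrite author's own statement) =====
-- stated objective: alternative
-- what changed: Replaced the count-array sliding window with its inner shrink loop by a single forward pass that keeps only the last-seen index of each of the three character categories and takes max(shortest all-three window ending at r, 6) as the candidate.
import Mathlib
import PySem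

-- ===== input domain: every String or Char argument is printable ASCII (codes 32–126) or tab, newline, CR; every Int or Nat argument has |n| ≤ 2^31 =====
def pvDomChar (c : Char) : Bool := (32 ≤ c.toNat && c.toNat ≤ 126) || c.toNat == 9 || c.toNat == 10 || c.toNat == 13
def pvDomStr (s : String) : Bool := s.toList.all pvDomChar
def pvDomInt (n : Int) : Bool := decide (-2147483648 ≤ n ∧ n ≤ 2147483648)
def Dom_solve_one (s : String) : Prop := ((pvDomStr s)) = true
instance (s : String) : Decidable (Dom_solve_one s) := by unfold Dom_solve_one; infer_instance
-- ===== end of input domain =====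

-- B replaces A's count-array sliding window (inner shrink loop) by a single forward pass
-- over the last-seen index of each character category (alternative decomposition, same cost).

-- ===== PORT A =====
-- port of cat(c): ord(c) ranges
def catP (c : Char) : Int :=
  let o : Int := (c.toNat : Int)
  if 65 ≤ o ∧ o ≤ 90 then 0
  else if 97 ≤ o ∧ o ≤ 122 then 1
  else 2

-- cnt[t] read: the index is always catP _ ∈ {0,1,2} on a 3-element list, never an IndexError
def pyGetL (xs : List Int) (i : Int) : Int := (PySem.List.pyGet? xs i).getD 0
-- cnt[t] = v write: exact for 0 ≤ i < len(xs), the only indices used here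
def pySetL (xs : List Int) (i : Int) (v : Int) : List Int := xs.set i.toNat v

-- the `while have == 3 and (r - l + 1) >= 6:` loop; s[l] read via pyGet? (in range when the loop runs)
def while3 (cs : List Char) (r : Int) (cnt : List Int) (haveC ans l : Int) :
    List Int × Int × Int × Int :=
  if h : haveC = 3 ∧ 6 ≤ r - l + 1 then
    let ans2 := min ans (r - l + 1)
    let tl := catP ((PySem.List.pyGet? cs l).getD ' ')
    let cnt2 := pySetL cnt tl (pyGetL cnt tl - 1)
    let haveC2 := if pyGetL cnt2 tl = 0 then haveC - 1 else haveC
    while3 cs r cnt2 haveC2 ans2 (l + 1)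
  else (cnt, haveC, ans, l)
termination_by (r + 1 - l).toNat
decreasing_by omega

-- one iteration of `for r, ch in enumerate(s):`
def stepA (cs : List Char) (st : List Int × Int × Int × Int) (rc : Int × Char) :
    List Int × Int × Int × Int :=
  match st with
  | (cnt, haveC, ans, l) =>
    let t := catP rc.2
    let haveC2 := if pyGetL cnt t = 0 then haveC + 1 else haveC
    let cnt2 := pySetL cnt t (pyGetL cnt t + 1)
    while3 cs rc.1 cnt2 haveC2 ans l

def solve_one (s : String) : Int :=
  let cs := s.toList
  let st := (PySem.List.enumerate cs 0).foldl (stepA cs) ([0, 0, 0], 0, 10 ^ 9, 0)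
  if st.2.2.1 = 10 ^ 9 then 0 else st.2.2.1

-- ===== PORT B =====
-- one iteration of B's single pass: update the last-seen index of ch's category, then the
-- candidate ending at r (shortest all-three window, clamped up to the minimum length 6)
def stepB (st : Int × Int × Int × Int) (rc : Int × Char) : Int × Int × Int × Int :=
  match st with
  | (lu, ll, ld, best) =>
    let r := rc.1
    let ch := rc.2
    let (lu2, ll2, ld2) :=
      if 'A' ≤ ch ∧ ch ≤ 'Z' then (r, ll, ld)
      else if 'a' ≤ ch ∧ ch ≤ 'z' then (lu, r, ld)
      else (lu, ll, r)
    if 0 ≤ lu2 ∧ 0 ≤ ll2 ∧ 0 ≤ ld2 then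
      let L := r - min (min lu2 ll2) ld2 + 1
      if 6 ≤ L then (lu2, ll2, ld2, min best L)
      else if 5 ≤ r then (lu2, ll2, ld2, min best 6)
      else (lu2, ll2, ld2, best)
    else (lu2, ll2, ld2, best)

def solve_one_alt (s : String) : Int :=
  let st := (PySem.List.enumerate s.toList 0).foldl stepB (-1, -1, -1, 10 ^ 9)
  if st.2.2.2 = 10 ^ 9 then 0 else st.2.2.2

-- ===== PRECONDITION & SPEC =====
def Spec_solve_one (s : String) (out : Int) : Prop := out = solve_one_alt s
instance (s : String) (out : Int) : Decidable (Spec_solve_one s out) := by unfold Spec_solve_one; infer_instance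

-- ===== CLAIM (what is proved, stated in full; the proofs are below) =====
def Claim_equal_solve_one : Prop := ∀ (s : String), Dom_solve_one s → Spec_solve_one s (solve_one s)

-- ===== LEMMAS AND PROOFS =====

-- number of characters of category t in q[l:]
def catCount (q : List Char) (t : Int) (l : Nat) : Int :=
  (((q.drop l).countP (fun c => catP c == t) : Nat) : Int)

-- A's `have` counter, recomputed from the counts
def indSum (q : List Char) (l : Nat) : Int :=
  (if 0 < catCount q 0 l then 1 else 0) + (if 0 < catCount q 1 l then 1 else 0) +
    (if 0 < catCount q 2 l then 1 else 0)

def cntList (q : List Char) (l : Nat) : List Int :=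
  [catCount q 0 l, catCount q 1 l, catCount q 2 l]

-- last index of category t in q, -1 if absent
def lastOccAux (t : Int) (q : List Char) (i acc : Int) : Int :=
  match q with
  | [] => acc
  | c :: rest => lastOccAux t rest (i + 1) (if catP c = t then i else acc)

def lastOcc (t : Int) (q : List Char) : Int := lastOccAux t q 0 (-1)

def minLast (q : List Char) : Int := min (min (lastOcc 0 q) (lastOcc 1 q)) (lastOcc 2 q)

-- the joint loop invariant after processing the prefix q
def InvJ (q : List Char) (cnt : List Int) (haveC ans l lu ll ld best : Int) : Prop :=
  0 ≤ l ∧ l.toNat ≤ q.length ∧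
  cnt = cntList q l.toNat ∧ haveC = indSum q l.toNat ∧
  lu = lastOcc 0 q ∧ ll = lastOcc 1 q ∧ ld = lastOcc 2 q ∧
  (minLast q < l ∨ (q.length : Int) < l + 6) ∧
  l ≤ minLast q + 1 ∧
  (l = 0 ∨ l + 5 ≤ (q.length : Int)) ∧
  (0 < l → ans ≤ (q.length : Int) - l + 1) ∧
  ans = best

theorem catP_eq (c : Char) :
    catP c = if 65 ≤ (c.toNat : Int) ∧ (c.toNat : Int) ≤ 90 then 0
      else if 97 ≤ (c.toNat : Int) ∧ (c.toNat : Int) ≤ 122 then 1 else 2 := rfl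

theorem catP_cases (c : Char) : catP c = 0 ∨ catP c = 1 ∨ catP c = 2 := by
  rw [catP_eq]; split_ifs <;> simp

theorem charle_iff (a b : Char) : a ≤ b ↔ a.toNat ≤ b.toNat := by
  rw [Char.le_def, UInt32.le_iff_toNat_le]
  exact Iff.rfl

theorem cat0_iff (c : Char) : catP c = 0 ↔ ('A' ≤ c ∧ c ≤ 'Z') := by
  rw [catP_eq, charle_iff, charle_iff,
    show 'A'.toNat = 65 from rfl, show 'Z'.toNat = 90 from rfl]
  split_ifs with h1 h2 <;> constructor <;> intro h <;> omega

theorem cat1_imp (c : Char) (h : catP c = 1) :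
    ¬('A' ≤ c ∧ c ≤ 'Z') ∧ ('a' ≤ c ∧ c ≤ 'z') := by
  rw [catP_eq] at h
  rw [charle_iff, charle_iff, charle_iff, charle_iff,
    show 'A'.toNat = 65 from rfl, show 'Z'.toNat = 90 from rfl,
    show 'a'.toNat = 97 from rfl, show 'z'.toNat = 122 from rfl]
  split_ifs at h with h1 h2 <;> constructor <;> omega

theorem cat2_imp (c : Char) (h : catP c = 2) :
    ¬('A' ≤ c ∧ c ≤ 'Z') ∧ ¬('a' ≤ c ∧ c ≤ 'z') := by
  rw [catP_eq] at h
  rw [charle_iff, charle_iff, charle_iff, charle_iff,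
    show 'A'.toNat = 65 from rfl, show 'Z'.toNat = 90 from rfl,
    show 'a'.toNat = 97 from rfl, show 'z'.toNat = 122 from rfl]
  split_ifs at h with h1 h2 <;> constructor <;> omega

theorem catCount_nonneg (q : List Char) (t : Int) (l : Nat) : 0 ≤ catCount q t l :=
  Int.natCast_nonneg _

theorem lastOccAux_lt (t : Int) (q : List Char) (i acc : Int) (h : acc < i) :
    lastOccAux t q i acc < i + q.length := by
  induction q generalizing i acc with
  | nil => simpa [lastOccAux] using h
  | cons c rest ih =>
    have := ih (i + 1) (if catP c = t then i else acc) (by split_ifs <;> omega)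
    simp only [lastOccAux, List.length_cons]
    push_cast [List.length_cons] at this ⊢
    omega

theorem lastOcc_lt (t : Int) (q : List Char) : lastOcc t q < q.length := by
  have := lastOccAux_lt t q 0 (-1) (by omega)
  simpa [lastOcc] using this

theorem lastOccAux_append (t : Int) (q : List Char) (c : Char) (i acc : Int) :
    lastOccAux t (q ++ [c]) i acc =
      if catP c = t then i + q.length else lastOccAux t q i acc := by
  induction q generalizing i acc with
  | nil => simp [lastOccAux]
  | cons d rest ih =>
    simp only [List.cons_append, lastOccAux, ih, List.length_cons]
    split_ifs <;> push_cast <;> omega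

theorem lastOcc_append (t : Int) (q : List Char) (c : Char) :
    lastOcc t (q ++ [c]) = if catP c = t then (q.length : Int) else lastOcc t q := by
  simp [lastOcc, lastOccAux_append]

theorem lastOcc_mono (t : Int) (q : List Char) (c : Char) :
    lastOcc t q ≤ lastOcc t (q ++ [c]) := by
  rw [lastOcc_append]
  have := lastOcc_lt t q
  split_ifs <;> omega

theorem minLast_mono (q : List Char) (c : Char) : minLast q ≤ minLast (q ++ [c]) := by
  have h0 := lastOcc_mono 0 q c
  have h1 := lastOcc_mono 1 q c
  have h2 := lastOcc_mono 2 q c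
  unfold minLast
  omega

theorem count_pos_iff (t : Int) (q : List Char) (l : Nat) (hl : l ≤ q.length) :
    0 < catCount q t l ↔ (l : Int) ≤ lastOcc t q := by
  induction q using List.reverseRecOn generalizing l with
  | nil =>
    have : l = 0 := by simpa using hl
    subst this
    simp [catCount, lastOcc, lastOccAux]
  | append_singleton q c ih =>
    rw [lastOcc_append]
    rcases Nat.lt_or_ge l (q.length + 1) with hlt | hge
    · have hle : l ≤ q.length := by omega
      have hcnt : catCount (q ++ [c]) t l
          = catCount q t l + (if catP c = t then 1 else 0) := by
        simp only [catCount, List.drop_append_of_le_length hle, List.countP_append]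
        push_cast
        split_ifs with h <;> simp [h]
      rw [hcnt]
      have h0 := catCount_nonneg q t l
      split_ifs with h
      · constructor <;> intro _ <;> [exact_mod_cast Nat.cast_le.mpr hle; omega]
      · simpa using ih l hle
    · have hl' : l = q.length + 1 := by
        have := hl
        simp only [List.length_append, List.length_cons, List.length_nil] at this
        omega
      subst hl'
      have hcnt : catCount (q ++ [c]) t (q.length + 1) = 0 := by
        simp [catCount, List.drop_eq_nil_of_le]
      rw [hcnt]
      have hlt2 := lastOcc_lt t q
      have hcast : ((q.length + 1 : Nat) : Int) = (q.length : Int) + 1 := by push_cast; ring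
      rw [hcast]
      split_ifs with hcat
      · constructor
        · intro h; omega
        · intro h; omega
      · constructor
        · intro h; omega
        · intro h; omega

theorem catCount_succ (q : List Char) (t : Int) (l : Nat) (hl : l < q.length) :
    catCount q t l = catCount q t (l + 1) + (if catP q[l] = t then 1 else 0) := by
  conv_lhs => rw [catCount, List.drop_eq_getElem_cons hl]
  simp only [List.countP_cons, catCount]
  push_cast
  split_ifs with h <;> simp_all

theorem catCount_append (q : List Char) (c : Char) (t : Int) (l : Nat) (hl : l ≤ q.length) :
    catCount (q ++ [c]) t l = catCount q t l + (if catP c = t then 1 else 0) := by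
  simp only [catCount, List.drop_append_of_le_length hl, List.countP_append]
  push_cast
  split_ifs with h <;> simp [h]

theorem indSum_three_iff (q : List Char) (l : Nat) (hl : l ≤ q.length) :
    indSum q l = 3 ↔ (l : Int) ≤ minLast q := by
  have h0 := count_pos_iff 0 q l hl
  have h1 := count_pos_iff 1 q l hl
  have h2 := count_pos_iff 2 q l hl
  unfold indSum minLast
  split_ifs <;> omega

theorem indSum_three_pos (q : List Char) (l : Nat) (h : indSum q l = 3) :
    0 < catCount q 0 l ∧ 0 < catCount q 1 l ∧ 0 < catCount q 2 l := by
  unfold indSum at h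
  split_ifs at h <;> omega

-- small-list indexing facts
theorem pyGetL_zero (a b c : Int) : pyGetL [a, b, c] 0 = a := rfl
theorem pyGetL_one (a b c : Int) : pyGetL [a, b, c] 1 = b := rfl
theorem pyGetL_two (a b c : Int) : pyGetL [a, b, c] 2 = c := rfl
theorem pySetL_zero (a b c v : Int) : pySetL [a, b, c] 0 v = [v, b, c] := rfl
theorem pySetL_one (a b c v : Int) : pySetL [a, b, c] 1 v = [a, v, c] := rfl
theorem pySetL_two (a b c v : Int) : pySetL [a, b, c] 2 v = [a, b, v] := rfl

theorem while3_spec_aux (cs q : List Char) (r : Int)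
    (hpre : q <+: cs) (hq : (q.length : Int) = r + 1) :
    ∀ (n : Nat) (l ans : Int), 0 ≤ l → l ≤ r + 1 → (r + 1 - l).toNat = n →
    while3 cs r (cntList q l.toNat) (indSum q l.toNat) ans l =
      if l ≤ min (minLast q) (r - 5) then
        (cntList q (min (minLast q) (r - 5) + 1).toNat,
         indSum q (min (minLast q) (r - 5) + 1).toNat,
         min ans (r - min (minLast q) (r - 5) + 1), min (minLast q) (r - 5) + 1)
      else (cntList q l.toNat, indSum q l.toNat, ans, l) := by
  intro n
  induction n using Nat.strong_induction_on with
  | _ n ih =>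
    intro l ans hl0 hlq hn
    have hlen : l.toNat ≤ q.length := by omega
    have h3 : indSum q l.toNat = 3 ↔ l ≤ minLast q := by
      have := indSum_three_iff q l.toNat hlen
      rwa [Int.toNat_of_nonneg hl0] at this
    by_cases hcond : l ≤ min (minLast q) (r - 5)
    · have hlM : l ≤ minLast q := le_trans hcond (min_le_left _ _)
      have hl5 : l ≤ r - 5 := le_trans hcond (min_le_right _ _)
      have h33 : indSum q l.toNat = 3 := h3.mpr hlM
      rw [while3, dif_pos ⟨h33, by omega⟩]
      have hlq' : l.toNat < q.length := by omega
      -- s[l] is q[l]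
      have hcs_get : (PySem.List.pyGet? cs l).getD ' ' = q[l.toNat] := by
        obtain ⟨tail, rfl⟩ := hpre
        have hlcs : l.toNat < (q ++ tail).length := by
          simp only [List.length_append]; omega
        have hk : l = ((l.toNat : Nat) : Int) := by omega
        conv_lhs => rw [hk, PySem.List.pyGet?_natCast]
        rw [List.getElem?_eq_getElem hlcs]
        simp [List.getElem_append_left hlq']
      have hdec0 := catCount_succ q 0 l.toNat hlq'
      have hdec1 := catCount_succ q 1 l.toNat hlq'
      have hdec2 := catCount_succ q 2 l.toNat hlq'
      obtain ⟨hp0, hp1, hp2⟩ := indSum_three_pos q l.toNat h33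
      have hn0 := catCount_nonneg q 0 (l.toNat + 1)
      have hn1 := catCount_nonneg q 1 (l.toNat + 1)
      have hn2 := catCount_nonneg q 2 (l.toNat + 1)
      have htn : (l + 1).toNat = l.toNat + 1 := by omega
      have hrec := ih ((r + 1 - (l + 1)).toNat) (by omega) (l + 1) (min ans (r - l + 1))
        (by omega) (by omega) rfl
      rw [htn] at hrec
      have hfin : ∀ cnt2 haveC2 : _, cnt2 = cntList q (l.toNat + 1) →
          haveC2 = indSum q (l.toNat + 1) →
          while3 cs r cnt2 haveC2 (min ans (r - l + 1)) (l + 1) =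
          if l ≤ min (minLast q) (r - 5) then
            (cntList q (min (minLast q) (r - 5) + 1).toNat,
             indSum q (min (minLast q) (r - 5) + 1).toNat,
             min ans (r - min (minLast q) (r - 5) + 1), min (minLast q) (r - 5) + 1)
          else (cntList q l.toNat, indSum q l.toNat, ans, l) := by
        intro cnt2 haveC2 hc2 hh2
        subst hc2 hh2
        rw [hrec]
        by_cases h2 : l + 1 ≤ min (minLast q) (r - 5)
        · rw [if_pos h2, if_pos hcond]
          simp only [Prod.mk.injEq, and_true, true_and]
          omega
        · have hlK : l = min (minLast q) (r - 5) := by omega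
          rw [if_neg h2, if_pos hcond, ← hlK, htn]
      dsimp only
      rw [hcs_get]
      rcases catP_cases q[l.toNat] with hc | hc | hc <;> rw [hc] <;>
        simp only [hc, show ¬((0:Int) = 1) by omega,
          show ¬((0:Int) = 2) by omega, show ¬((1:Int) = 0) by omega,
          show ¬((1:Int) = 2) by omega, show ¬((2:Int) = 0) by omega,
          show ¬((2:Int) = 1) by omega, if_true, if_false, add_zero] at hdec0 hdec1 hdec2
      · rw [show pySetL (cntList q l.toNat) 0 (pyGetL (cntList q l.toNat) 0 - 1)
              = cntList q (l.toNat + 1) by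
            simp only [cntList, pyGetL_zero, pySetL_zero, List.cons.injEq, and_true]
            exact ⟨by omega, by omega, by omega⟩]
        rw [show (if pyGetL (cntList q (l.toNat + 1)) 0 = 0
              then indSum q l.toNat - 1 else indSum q l.toNat) = indSum q (l.toNat + 1) by
            simp only [cntList, pyGetL_zero, indSum]
            split_ifs <;> omega]
        exact hfin _ _ rfl rfl
      · rw [show pySetL (cntList q l.toNat) 1 (pyGetL (cntList q l.toNat) 1 - 1)
              = cntList q (l.toNat + 1) by
            simp only [cntList, pyGetL_one, pySetL_one, List.cons.injEq, and_true]
            exact ⟨by omega, by omega, by omega⟩]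
        rw [show (if pyGetL (cntList q (l.toNat + 1)) 1 = 0
              then indSum q l.toNat - 1 else indSum q l.toNat) = indSum q (l.toNat + 1) by
            simp only [cntList, pyGetL_one, indSum]
            split_ifs <;> omega]
        exact hfin _ _ rfl rfl
      · rw [show pySetL (cntList q l.toNat) 2 (pyGetL (cntList q l.toNat) 2 - 1)
              = cntList q (l.toNat + 1) by
            simp only [cntList, pyGetL_two, pySetL_two, List.cons.injEq, and_true]
            exact ⟨by omega, by omega, by omega⟩]
        rw [show (if pyGetL (cntList q (l.toNat + 1)) 2 = 0
              then indSum q l.toNat - 1 else indSum q l.toNat) = indSum q (l.toNat + 1) by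
            simp only [cntList, pyGetL_two, indSum]
            split_ifs <;> omega]
        exact hfin _ _ rfl rfl
    · rw [while3, dif_neg, if_neg hcond]
      intro hcontr
      obtain ⟨hhave, hlenC⟩ := hcontr
      have := h3.mp hhave
      omega

theorem while3_spec (cs q : List Char) (r : Int)
    (hpre : q <+: cs) (hq : (q.length : Int) = r + 1)
    (l ans : Int) (hl0 : 0 ≤ l) (hlq : l ≤ r + 1) :
    while3 cs r (cntList q l.toNat) (indSum q l.toNat) ans l =
      if l ≤ min (minLast q) (r - 5) then
        (cntList q (min (minLast q) (r - 5) + 1).toNat,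
         indSum q (min (minLast q) (r - 5) + 1).toNat,
         min ans (r - min (minLast q) (r - 5) + 1), min (minLast q) (r - 5) + 1)
      else (cntList q l.toNat, indSum q l.toNat, ans, l) :=
  while3_spec_aux cs q r hpre hq _ l ans hl0 hlq rfl

-- the common tail of one outer iteration: A runs the shrink loop, B merges its candidate
theorem step_core (cs q rest : List Char) (c : Char) (hcs : cs = q ++ c :: rest)
    (ans l best lu2 ll2 ld2 : Int)
    (hlu2 : lu2 = lastOcc 0 (q ++ [c])) (hll2 : ll2 = lastOcc 1 (q ++ [c]))
    (hld2 : ld2 = lastOcc 2 (q ++ [c]))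
    (hl0 : 0 ≤ l) (hlen : l.toNat ≤ q.length)
    (hstop : minLast q < l ∨ (q.length : Int) < l + 6)
    (hlm : l ≤ minLast q + 1)
    (hg : l = 0 ∨ l + 5 ≤ (q.length : Int))
    (hi : 0 < l → ans ≤ (q.length : Int) - l + 1)
    (hab : ans = best) :
    ∃ cnt' haveC' ans' l' lu' ll' ld' best',
      while3 cs (q.length : Int) (cntList (q ++ [c]) l.toNat) (indSum (q ++ [c]) l.toNat) ans l
        = (cnt', haveC', ans', l') ∧
      (if 0 ≤ lu2 ∧ 0 ≤ ll2 ∧ 0 ≤ ld2 then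
        if 6 ≤ (q.length : Int) - min (min lu2 ll2) ld2 + 1 then
          (lu2, ll2, ld2, min best ((q.length : Int) - min (min lu2 ll2) ld2 + 1))
        else if 5 ≤ (q.length : Int) then (lu2, ll2, ld2, min best 6)
        else (lu2, ll2, ld2, best)
       else (lu2, ll2, ld2, best)) = (lu', ll', ld', best') ∧
      InvJ (q ++ [c]) cnt' haveC' ans' l' lu' ll' ld' best' := by
  subst hlu2 hll2 hld2 hab
  set r : Int := (q.length : Int) with hr
  set q' : List Char := q ++ [c] with hq'
  have hr' : ((q'.length : Nat) : Int) = r + 1 := by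
    simp [hq', hr]
  have hpre' : q' <+: cs := ⟨rest, by simp [hcs, hq']⟩
  have hM : min (min (lastOcc 0 q') (lastOcc 1 q')) (lastOcc 2 q') = minLast q' := rfl
  have hMq : min (min (lastOcc 0 q) (lastOcc 1 q)) (lastOcc 2 q) = minLast q := rfl
  have hmono : minLast q ≤ minLast q' := minLast_mono q c
  have hMlt : minLast q' < r + 1 := by
    have h0 := lastOcc_lt 0 q'
    have h1 := lastOcc_lt 1 q'
    have h2 := lastOcc_lt 2 q'
    unfold minLast
    omega
  have hws := while3_spec cs q' r hpre' hr' l ans hl0 (by omega)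
  by_cases hK : l ≤ min (minLast q') (r - 5)
  · rw [if_pos hK] at hws
    have hM0 : 0 ≤ minLast q' := by omega
    have hall : 0 ≤ lastOcc 0 q' ∧ 0 ≤ lastOcc 1 q' ∧ 0 ≤ lastOcc 2 q' := by
      unfold minLast at hM0
      omega
    rw [if_pos hall]
    by_cases hL : 6 ≤ r - min (min (lastOcc 0 q') (lastOcc 1 q')) (lastOcc 2 q') + 1
    · rw [if_pos hL]
      rw [hM] at hL
      refine ⟨_, _, _, _, _, _, _, _, hws, rfl,
        by omega, by omega, rfl, rfl, rfl, rfl, rfl, by omega, by omega, by omega,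
        by intro _; omega, by rw [hM]; omega⟩
    · rw [if_neg hL]
      rw [hM] at hL
      have h5 : (5:Int) ≤ r := by omega
      rw [if_pos h5]
      refine ⟨_, _, _, _, _, _, _, _, hws, rfl,
        by omega, by omega, rfl, rfl, rfl, rfl, rfl, by omega, by omega, by omega,
        by intro _; omega, by omega⟩
  · rw [if_neg hK] at hws
    have hInvTail : (minLast q' < l ∨ ((q'.length : Nat) : Int) < l + 6) ∧
        l ≤ minLast q' + 1 ∧ (l = 0 ∨ l + 5 ≤ ((q'.length : Nat) : Int)) ∧
        (0 < l → ans ≤ ((q'.length : Nat) : Int) - l + 1) := by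
      rw [hr']
      refine ⟨by omega, by omega, by omega, by intro h; have := hi h; omega⟩
    by_cases hall : 0 ≤ lastOcc 0 q' ∧ 0 ≤ lastOcc 1 q' ∧ 0 ≤ lastOcc 2 q'
    · rw [if_pos hall]
      have hM0 : 0 ≤ minLast q' := by unfold minLast; omega
      by_cases hL : 6 ≤ r - min (min (lastOcc 0 q') (lastOcc 1 q')) (lastOcc 2 q') + 1
      · rw [if_pos hL, hM] at *
        have hansle : ans ≤ r - minLast q' + 1 := by
          rcases hg with h | h
          · subst h
            omega
          · have := hi (by omega)
            omega
        have : min ans (r - minLast q' + 1) = ans := by omega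
        rw [hM]
        refine ⟨_, _, _, _, _, _, _, _, hws, rfl,
          hl0, by omega, rfl, rfl, rfl, rfl, rfl, hInvTail.1, hInvTail.2.1, hInvTail.2.2.1,
          hInvTail.2.2.2, by omega⟩
      · rw [if_neg hL, hM] at *
        by_cases h5 : (5:Int) ≤ r
        · rw [if_pos h5]
          have hansle : ans ≤ 6 := by
            rcases hg with h | h
            · subst h
              omega
            · have := hi (by omega)
              omega
          refine ⟨_, _, _, _, _, _, _, _, hws, rfl,
            hl0, by omega, rfl, rfl, rfl, rfl, rfl, hInvTail.1, hInvTail.2.1, hInvTail.2.2.1,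
            hInvTail.2.2.2, by omega⟩
        · rw [if_neg h5]
          refine ⟨_, _, _, _, _, _, _, _, hws, rfl,
            hl0, by omega, rfl, rfl, rfl, rfl, rfl, hInvTail.1, hInvTail.2.1, hInvTail.2.2.1,
            hInvTail.2.2.2, rfl⟩
    · rw [if_neg hall]
      refine ⟨_, _, _, _, _, _, _, _, hws, rfl,
        hl0, by omega, rfl, rfl, rfl, rfl, rfl, hInvTail.1, hInvTail.2.1, hInvTail.2.2.1,
        hInvTail.2.2.2, rfl⟩

theorem step_preserves (cs q rest : List Char) (c : Char) (hcs : cs = q ++ c :: rest)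
    (cnt : List Int) (haveC ans l lu ll ld best : Int)
    (hInv : InvJ q cnt haveC ans l lu ll ld best) :
    ∃ cnt' haveC' ans' l' lu' ll' ld' best',
      stepA cs (cnt, haveC, ans, l) ((q.length : Int), c) = (cnt', haveC', ans', l') ∧
      stepB (lu, ll, ld, best) ((q.length : Int), c) = (lu', ll', ld', best') ∧
      InvJ (q ++ [c]) cnt' haveC' ans' l' lu' ll' ld' best' := by
  obtain ⟨hl0, hlen, hcnt, hhave, hlu, hll, hld, hstop, hlm, hg, hi, hab⟩ := hInv
  subst hcnt hhave hlu hll hld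
  have ha0 := catCount_append q c 0 l.toNat hlen
  have ha1 := catCount_append q c 1 l.toNat hlen
  have ha2 := catCount_append q c 2 l.toNat hlen
  have hn0 := catCount_nonneg q 0 l.toNat
  have hn1 := catCount_nonneg q 1 l.toNat
  have hn2 := catCount_nonneg q 2 l.toNat
  have hla0 := lastOcc_append 0 q c
  have hla1 := lastOcc_append 1 q c
  have hla2 := lastOcc_append 2 q c
  unfold stepA stepB
  dsimp only
  rcases catP_cases c with hc | hc | hc <;> rw [hc] <;>
    simp only [hc, show ¬((0:Int) = 1) by omega,
      show ¬((0:Int) = 2) by omega, show ¬((1:Int) = 0) by omega,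
      show ¬((1:Int) = 2) by omega, show ¬((2:Int) = 0) by omega,
      show ¬((2:Int) = 1) by omega, if_true, if_false, add_zero] at ha0 ha1 ha2 hla0 hla1 hla2
  · rw [if_pos ((cat0_iff c).mp hc)]
    rw [show pySetL (cntList q l.toNat) 0 (pyGetL (cntList q l.toNat) 0 + 1)
          = cntList (q ++ [c]) l.toNat by
        simp only [cntList, pyGetL_zero, pySetL_zero, List.cons.injEq, and_true]
        exact ⟨by omega, by omega, by omega⟩]
    rw [show (if pyGetL (cntList q l.toNat) 0 = 0
          then indSum q l.toNat + 1 else indSum q l.toNat) = indSum (q ++ [c]) l.toNat by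
        simp only [cntList, pyGetL_zero, indSum, ha0, ha1, ha2]
        split_ifs <;> omega]
    exact step_core cs q rest c hcs ans l best ((q.length : Int)) (lastOcc 1 q) (lastOcc 2 q)
      (by omega) (by omega) (by omega) hl0 hlen hstop hlm hg hi hab
  · obtain ⟨hnu, hlo⟩ := cat1_imp c hc
    rw [if_neg hnu, if_pos hlo]
    rw [show pySetL (cntList q l.toNat) 1 (pyGetL (cntList q l.toNat) 1 + 1)
          = cntList (q ++ [c]) l.toNat by
        simp only [cntList, pyGetL_one, pySetL_one, List.cons.injEq, and_true]
        exact ⟨by omega, by omega, by omega⟩]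
    rw [show (if pyGetL (cntList q l.toNat) 1 = 0
          then indSum q l.toNat + 1 else indSum q l.toNat) = indSum (q ++ [c]) l.toNat by
        simp only [cntList, pyGetL_one, indSum, ha0, ha1, ha2]
        split_ifs <;> omega]
    exact step_core cs q rest c hcs ans l best (lastOcc 0 q) ((q.length : Int)) (lastOcc 2 q)
      (by omega) (by omega) (by omega) hl0 hlen hstop hlm hg hi hab
  · obtain ⟨hnu, hnl⟩ := cat2_imp c hc
    rw [if_neg hnu, if_neg hnl]
    rw [show pySetL (cntList q l.toNat) 2 (pyGetL (cntList q l.toNat) 2 + 1)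
          = cntList (q ++ [c]) l.toNat by
        simp only [cntList, pyGetL_two, pySetL_two, List.cons.injEq, and_true]
        exact ⟨by omega, by omega, by omega⟩]
    rw [show (if pyGetL (cntList q l.toNat) 2 = 0
          then indSum q l.toNat + 1 else indSum q l.toNat) = indSum (q ++ [c]) l.toNat by
        simp only [cntList, pyGetL_two, indSum, ha0, ha1, ha2]
        split_ifs <;> omega]
    exact step_core cs q rest c hcs ans l best (lastOcc 0 q) (lastOcc 1 q) ((q.length : Int))
      (by omega) (by omega) (by omega) hl0 hlen hstop hlm hg hi hab

theorem fold_agree (rest : List Char) :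
    ∀ (q cs : List Char), cs = q ++ rest →
    ∀ (cnt : List Int) (haveC ans l lu ll ld best : Int),
    InvJ q cnt haveC ans l lu ll ld best →
    ∃ cnt' haveC' ans' l' lu' ll' ld' best',
      (PySem.List.enumerate rest (q.length : Int)).foldl (stepA cs) (cnt, haveC, ans, l)
        = (cnt', haveC', ans', l') ∧
      (PySem.List.enumerate rest (q.length : Int)).foldl stepB (lu, ll, ld, best)
        = (lu', ll', ld', best') ∧
      ans' = best' := by
  induction rest with
  | nil =>
    intro q cs hcs cnt haveC ans l lu ll ld best hInv
    exact ⟨cnt, haveC, ans, l, lu, ll, ld, best, by simp [PySem.List.enumerate],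
      by simp [PySem.List.enumerate], hInv.2.2.2.2.2.2.2.2.2.2.2⟩
  | cons c rest ih =>
    intro q cs hcs cnt haveC ans l lu ll ld best hInv
    obtain ⟨cnt1, haveC1, ans1, l1, lu1, ll1, ld1, best1, hA, hB, hInv1⟩ :=
      step_preserves cs q rest c hcs cnt haveC ans l lu ll ld best hInv
    have hcs' : cs = (q ++ [c]) ++ rest := by simp [hcs]
    obtain ⟨cnt', haveC', ans', l', lu', ll', ld', best', hA', hB', hfin⟩ :=
      ih (q ++ [c]) cs hcs' cnt1 haveC1 ans1 l1 lu1 ll1 ld1 best1 hInv1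
    have hlen1 : ((q ++ [c]).length : Int) = (q.length : Int) + 1 := by
      push_cast [List.length_append, List.length_singleton]
      ring
    refine ⟨cnt', haveC', ans', l', lu', ll', ld', best', ?_, ?_, hfin⟩
    · rw [PySem.List.enumerate_cons, List.foldl_cons, hA, show (q.length : Int) + 1
        = ((q ++ [c]).length : Int) from hlen1.symm]
      exact hA'
    · rw [PySem.List.enumerate_cons, List.foldl_cons, hB, show (q.length : Int) + 1
        = ((q ++ [c]).length : Int) from hlen1.symm]
      exact hB'

theorem InvJ_init : InvJ [] [0, 0, 0] 0 (10 ^ 9) 0 (-1) (-1) (-1) (10 ^ 9) := by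
  refine ⟨le_refl 0, by simp, rfl, rfl, rfl, rfl, rfl, Or.inl (by decide), by decide,
    Or.inl rfl, ?_, rfl⟩
  intro h
  exact absurd h (by norm_num)

-- ===== VERDICT (by name: the statement is the Claim_ definition above) =====
theorem solve_one_spec : Claim_equal_solve_one := by
  intro s _
  unfold Spec_solve_one solve_one solve_one_alt
  obtain ⟨cnt', haveC', ans', l', lu', ll', ld', best', hA, hB, hfin⟩ :=
    fold_agree s.toList [] s.toList rfl [0, 0, 0] 0 (10 ^ 9) 0 (-1) (-1) (-1) (10 ^ 9) InvJ_init
  rw [show ((List.length ([] : List Char) : Int)) = 0 from rfl] at hA hB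
  dsimp only
  rw [hA, hB]
  simp [hfin]
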